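-- pv_equiv track=rewrite | github.com/shivasurya/code-pathfinder | sast-engine/tools/typeshed-converter/mro.py | _c3_merge
-- ===== SOURCE A (Python) =====
-- def _c3_merge(sequences: list[list[str]]) -> list[str] | None:
--     """C3 merge algorithm.
--
--     Returns merged linearization, or None if inconsistent.
--     """
--     result: list[str] = []
--     seqs = [list(s) for s in sequences if s]  # deep copy, filter empty
--
--     max_iterations = 1000  # safety bound
--     iterations = 0
--
--     while seqs:
--         iterations += 1
--         if iterations > max_iterations:
--             return None
--
--         # Find a head that doesn't appear in the tail of any other sequence
--         candidate = None
--         for seq in seqs: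
--             head = seq[0]
--             # Check if head is NOT in any tail
--             in_tail = False
--             for other_seq in seqs:
--                 if head in other_seq[1:]:
--                     in_tail = True
--                     break
--             if not in_tail:
--                 candidate = head
--                 break
--
--         if candidate is None:
--             # No valid candidate — inconsistent hierarchy
--             return None
--
--         result.append(candidate)
--
--         # Remove candidate from all sequences
--         new_seqs: list[list[str]] = []
--         for seq in seqs:
--             filtered = [x for x in seq if x != candidate]
--             if filtered:
--                 new_seqs.append(filtered)
--         seqs = new_seqs
--
--     return result
-- ===== SOURCE B (Python) =====
-- def _c3_merge(sequences: list[list[str]]) -> list[str] | None: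
--     """C3 merge with incremental tail-occurrence counts: counts are built once;
--     a head is a valid candidate iff its count is 0; removing the candidate only
--     pops matching heads and decrements the count of each newly exposed head."""
--     seqs = [list(s) for s in sequences if s]
--     count: dict[str, int] = {}
--     for s in seqs:
--         for x in s[1:]:
--             count[x] = count.get(x, 0) + 1
--     result: list[str] = []
--     for _ in range(1000):  # same safety bound as before
--         if not any(seqs):
--             return result
--         candidate = None
--         for s in seqs:
--             if s and count.get(s[0], 0) == 0:
--                 candidate = s[0]
--                 break
--         if candidate is None:
--             return None
--         result.append(candidate)
--         for s in seqs:
--             if s and s[0] == candidate: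
--                 del s[0]
--                 if s:
--                     count[s[0]] = count.get(s[0], 0) - 1
--     return result if not any(seqs) else None
-- ===== Notes on version B (the rewrite author's own statement) =====
-- stated objective: faster
-- what changed: B builds tail-occurrence counts once and maintains them incrementally (a head is a candidate iff its count is 0; removal pops matching heads and decrements the count of each newly exposed head), replacing A's per-round nested tail scans and full rebuild-by-filtering of every sequence.
import Mathlib
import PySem

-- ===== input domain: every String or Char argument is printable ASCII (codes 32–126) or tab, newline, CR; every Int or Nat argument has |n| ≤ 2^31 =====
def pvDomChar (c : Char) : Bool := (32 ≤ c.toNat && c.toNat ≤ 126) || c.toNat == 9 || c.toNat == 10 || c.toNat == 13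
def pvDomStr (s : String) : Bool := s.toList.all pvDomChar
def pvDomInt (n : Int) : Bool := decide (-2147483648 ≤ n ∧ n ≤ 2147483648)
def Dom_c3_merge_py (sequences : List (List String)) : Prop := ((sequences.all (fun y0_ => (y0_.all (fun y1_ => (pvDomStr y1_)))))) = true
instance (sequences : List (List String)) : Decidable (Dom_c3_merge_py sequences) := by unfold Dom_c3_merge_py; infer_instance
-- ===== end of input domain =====

-- B replaces A's per-round nested tail scans by tail-occurrence counts built once and
-- maintained incrementally (candidate = first head with count 0; removal pops matching
-- heads and decrements the count of each newly exposed head): objective = faster.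

-- ===== PORT A =====
-- 'head in other_seq[1:]' checked against every sequence
def pvAInTail (head : String) (seqs : List (List String)) : Bool :=
  seqs.any (fun other => (other.drop 1).contains head)

-- 'for seq in seqs: … if not in_tail: candidate = head; break'
def pvAFind : List (List String) → List (List String) → Option String
  | [], _ => none
  | seq :: rest, all =>
    let head := seq.headD ""   -- seq[0]; seqs only ever holds nonempty lists
    if pvAInTail head all then pvAFind rest all else some head

-- the while loop; fuel = remaining allowed iterations (max_iterations = 1000)
def pvALoop (fuel : Nat) (result : List String) (seqs : List (List String)) : Option (List String) :=
  if seqs.isEmpty then some result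
  else match fuel with
    | 0 => none    -- iterations > max_iterations
    | fuel' + 1 =>
      match pvAFind seqs seqs with
      | none => none
      | some c =>
        pvALoop fuel' (result ++ [c])
          ((seqs.map (fun s => s.filter (fun x => x != c))).filter (fun s => !s.isEmpty))

def c3_merge_py (sequences : List (List String)) : Option (List String) :=
  pvALoop 1000 [] (sequences.filter (fun s => !s.isEmpty))

-- ===== PORT B =====
-- count[x] = count.get(x, 0) + 1 over every tail element, built once
def pvBCount (seqs : List (List String)) : PySem.Dict String Int :=
  seqs.foldl (fun d s => (s.drop 1).foldl (fun d x => d.modify x 0 (· + 1)) d) PySem.Dict.empty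

-- 'for s in seqs: if s and count.get(s[0], 0) == 0: candidate = s[0]; break'
def pvBCand (count : PySem.Dict String Int) : List (List String) → Option String
  | [] => none
  | [] :: rest => pvBCand count rest
  | (h :: _) :: rest => if count.getD h 0 == 0 then some h else pvBCand count rest

-- 'for s in seqs: if s and s[0] == candidate: del s[0]; if s: count[s[0]] = count.get(s[0],0) - 1'
def pvBStep (c : String) : List (List String) → PySem.Dict String Int → List (List String) × PySem.Dict String Int
  | [], count => ([], count)
  | [] :: rest, count =>
    let r := pvBStep c rest count
    ([] :: r.1, r.2)
  | (h :: t) :: rest, count =>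
    if h == c then
      let count' := match t with
        | [] => count
        | h' :: _ => count.modify h' 0 (· - 1)
      let r := pvBStep c rest count'
      (t :: r.1, r.2)
    else
      let r := pvBStep c rest count
      ((h :: t) :: r.1, r.2)

-- 'for _ in range(1000)'; fuel = remaining passes; fuel 0 = after the loop
def pvBLoop : Nat → List String → List (List String) → PySem.Dict String Int → Option (List String)
  | 0, result, seqs, _ => if seqs.all List.isEmpty then some result else none
  | fuel + 1, result, seqs, count =>
    if seqs.all List.isEmpty then some result
    else match pvBCand count seqs with
      | none => none
      | some c =>
        let r := pvBStep c seqs count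
        pvBLoop fuel (result ++ [c]) r.1 r.2

def c3_merge_py_alt (sequences : List (List String)) : Option (List String) :=
  pvBLoop 1000 [] (sequences.filter (fun s => !s.isEmpty))
    (pvBCount (sequences.filter (fun s => !s.isEmpty)))

-- ===== PRECONDITION & SPEC =====
def Spec_c3_merge_py (sequences : List (List String)) (out : Option (List String)) : Prop := out = c3_merge_py_alt sequences
instance (sequences : List (List String)) (out : Option (List String)) : Decidable (Spec_c3_merge_py sequences out) := by unfold Spec_c3_merge_py; infer_instance

-- ===== CLAIM (what is proved, stated in full; the proofs are below) =====
def Claim_equal_c3_merge_py : Prop := ∀ (sequences : List (List String)), Dom_c3_merge_py sequences → Spec_c3_merge_py sequences (c3_merge_py sequences)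

-- ===== LEMMAS AND PROOFS =====

-- number of occurrences of x in the tails of seqs (what B's counter tracks)
def pvTailCount (x : String) (seqs : List (List String)) : Nat :=
  (seqs.map (fun s => (s.drop 1).count x)).sum

-- nonempty sequences, in order (A's live list, recovered from B's state)
def pvAbs (seqs : List (List String)) : List (List String) :=
  seqs.filter (fun s => !s.isEmpty)

-- B's in-place head pop, per element
def pvBStepElem (c : String) : List String → List String
  | [] => []
  | h :: t => if h == c then t else h :: t

-- decrements performed by B's removal pass, per element
def pvDec (c x : String) : List String → Nat
  | h :: h' :: _ => if h = c ∧ h' = x then 1 else 0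
  | _ => 0

def pvInv (count : PySem.Dict String Int) (seqs : List (List String)) : Prop :=
  ∀ x, count.getD x 0 = (pvTailCount x seqs : Int)

theorem pvBCount_aux (l : List (List String)) (d : PySem.Dict String Int) (x : String) :
    (l.foldl (fun d s => (s.drop 1).foldl (fun d x => d.modify x 0 (· + 1)) d) d).getD x 0
      = d.getD x 0 + (pvTailCount x l : Int) := by
  induction l generalizing d with
  | nil => simp [pvTailCount]
  | cons s rest ih =>
    simp only [List.foldl_cons, ih, PySem.Dict.getD_foldl_modify_add_one, pvTailCount,
      List.map_cons, List.sum_cons]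
    push_cast
    ring

theorem pvInv_init (seqs : List (List String)) : pvInv (pvBCount seqs) seqs := by
  intro x
  unfold pvBCount
  rw [pvBCount_aux]
  simp

theorem pvTailCount_zero_iff (c : String) (l : List (List String)) :
    pvTailCount c l = 0 ↔ ∀ s ∈ l, c ∉ s.drop 1 := by
  unfold pvTailCount
  rw [List.sum_eq_zero_iff]
  constructor
  · intro h s hs hc
    have := h _ (List.mem_map_of_mem hs)
    rw [List.count_eq_zero] at this
    exact this hc
  · intro h n hn
    obtain ⟨s, hs, rfl⟩ := List.mem_map.mp hn
    rw [List.count_eq_zero]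
    exact h s hs

theorem pvAInTail_abs (h : String) (seqs : List (List String)) :
    pvAInTail h (pvAbs seqs) = true ↔ pvTailCount h seqs ≠ 0 := by
  rw [ne_eq, pvTailCount_zero_iff]
  push Not
  unfold pvAInTail pvAbs
  simp only [List.any_eq_true, List.mem_filter, List.contains_eq_mem, decide_eq_true_eq]
  constructor
  · rintro ⟨s, ⟨hs, _⟩, hm⟩
    exact ⟨s, hs, hm⟩
  · rintro ⟨s, hs, hm⟩
    refine ⟨s, ⟨hs, ?_⟩, hm⟩
    cases s with
    | nil => simp at hm
    | cons a b => simp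

theorem pvAbs_cons (s : List String) (l : List (List String)) :
    pvAbs (s :: l) = if s.isEmpty then pvAbs l else s :: pvAbs l := by
  unfold pvAbs
  rw [List.filter_cons]
  cases hs : s.isEmpty <;> simp

theorem pvFind_eq_cand (count : PySem.Dict String Int) (seqs : List (List String))
    (hinv : pvInv count seqs) (l : List (List String)) :
    pvAFind (pvAbs l) (pvAbs seqs) = pvBCand count l := by
  induction l with
  | nil => rfl
  | cons s rest ih =>
    cases s with
    | nil => simpa [pvAbs_cons, pvBCand] using ih
    | cons h t =>
      rw [pvAbs_cons]
      simp only [List.isEmpty_cons, if_neg Bool.false_ne_true]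
      simp only [pvAFind, pvBCand, List.headD]
      have hkey : (count.getD h 0 == 0) = !pvAInTail h (pvAbs seqs) := by
        have h1 : (count.getD h 0 == 0) = decide (pvTailCount h seqs = 0) := by
          rw [hinv h, Bool.eq_iff_iff]
          simp
        rw [h1]
        by_cases hz : pvTailCount h seqs = 0
        · have hb : pvAInTail h (pvAbs seqs) = false := by
            cases hb2 : pvAInTail h (pvAbs seqs)
            · rfl
            · exact absurd hz ((pvAInTail_abs h seqs).mp hb2)
          simp [hz, hb]
        · have hb := (pvAInTail_abs h seqs).mpr hz
          simp [hz, hb]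
      rw [hkey]
      rcases Bool.eq_false_or_eq_true (pvAInTail h (pvAbs seqs)) with hb | hb <;>
        simp [hb, ih]

theorem pvBCand_some_zero (count : PySem.Dict String Int) (l : List (List String)) (c : String)
    (h : pvBCand count l = some c) : count.getD c 0 = 0 := by
  induction l with
  | nil => simp [pvBCand] at h
  | cons s rest ih =>
    cases s with
    | nil => exact ih (by simpa [pvBCand] using h)
    | cons a t =>
      by_cases hz : count.getD a 0 == 0
      · have ha : a = c := by simpa [pvBCand, hz] using h
        subst ha
        simpa using hz
      · exact ih (by simpa [pvBCand, hz] using h)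

theorem pvBStep_fst (c : String) (l : List (List String)) (count : PySem.Dict String Int) :
    (pvBStep c l count).1 = l.map (pvBStepElem c) := by
  induction l generalizing count with
  | nil => rfl
  | cons s rest ih =>
    cases s with
    | nil => simp [pvBStep, pvBStepElem, ih]
    | cons h t =>
      by_cases hh : h == c
      · simp [pvBStep, pvBStepElem, hh, ih]
      · simp [pvBStep, pvBStepElem, hh, ih]

theorem pvBStep_snd (c : String) (l : List (List String)) (count : PySem.Dict String Int) (x : String) :
    ((pvBStep c l count).2).getD x 0 = count.getD x 0 - ((l.map (pvDec c x)).sum : Int) := by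
  induction l generalizing count with
  | nil => simp [pvBStep]
  | cons s rest ih =>
    cases s with
    | nil => simp [pvBStep, pvDec, ih]
    | cons h t =>
      by_cases hh : h == c
      · cases t with
        | nil =>
          simp only [pvBStep, hh, if_pos]
          rw [ih]
          simp [pvDec]
        | cons h' t' =>
          simp only [pvBStep, hh, if_pos]
          rw [ih, PySem.Dict.getD_modify]
          have hhc : h = c := by simpa using hh
          by_cases hx : x = h'
          · subst hx
            simp [pvDec, hhc]
            ring
          · simp [pvDec, hhc, hx, Ne.symm hx]
      · simp only [pvBStep, hh, if_neg, Bool.false_eq_true, not_false_iff]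
        rw [ih]
        have hhc : ¬ h = c := by simpa using hh
        cases t with
        | nil => simp [pvDec]
        | cons h' t' => simp [pvDec, hhc]

theorem pvTailCount_step (c x : String) (l : List (List String)) :
    pvTailCount x (l.map (pvBStepElem c)) + (l.map (pvDec c x)).sum = pvTailCount x l := by
  induction l with
  | nil => simp [pvTailCount]
  | cons s rest ih =>
    have hel : ((pvBStepElem c s).drop 1).count x + pvDec c x s = (s.drop 1).count x := by
      cases s with
      | nil => simp [pvBStepElem, pvDec]
      | cons h t =>
        by_cases hh : h = c
        · cases t with
          | nil => simp [pvBStepElem, pvDec, hh]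
          | cons h' t' =>
            by_cases hx : h' = x
            · simp [pvBStepElem, pvDec, hh, hx]
            · simp [pvBStepElem, pvDec, hh, hx]
        · cases t with
          | nil => simp [pvBStepElem, pvDec, hh]
          | cons h' t' => simp [pvBStepElem, pvDec, hh]
    simp only [pvTailCount, List.map_cons, List.sum_cons] at *
    omega

theorem pvInv_step (c : String) (l : List (List String)) (count : PySem.Dict String Int)
    (hinv : pvInv count l) : pvInv (pvBStep c l count).2 (pvBStep c l count).1 := by
  intro x
  rw [pvBStep_snd, pvBStep_fst, hinv x]
  have := pvTailCount_step c x l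
  push_cast [← this]
  ring

theorem pvElem_filter (c : String) (s : List String) (hc : c ∉ s.drop 1) :
    s.filter (fun x => x != c) = pvBStepElem c s := by
  cases s with
  | nil => rfl
  | cons h t =>
    simp only [List.drop_one, List.tail_cons] at hc
    have ht : t.filter (fun x => x != c) = t := by
      rw [List.filter_eq_self]
      intro a ha
      simp only [bne_iff_ne, ne_eq]
      rintro rfl
      exact hc ha
    by_cases hh : h = c
    · subst hh
      simp [pvBStepElem, ht]
    · simp [pvBStepElem, ht, hh, bne_iff_ne]

theorem pvAbs_step (c : String) (l : List (List String)) (hc : ∀ s ∈ l, c ∉ s.drop 1) :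
    ((pvAbs l).map (fun s => s.filter (fun x => x != c))).filter (fun s => !s.isEmpty)
      = pvAbs (l.map (pvBStepElem c)) := by
  induction l with
  | nil => rfl
  | cons s rest ih =>
    have ih' := ih (fun t ht => hc t (List.mem_cons_of_mem _ ht))
    have hfs := pvElem_filter c s (hc s (List.mem_cons_self ..))
    cases s with
    | nil => simpa [pvAbs_cons, pvBStepElem] using ih'
    | cons h t =>
      rw [pvAbs_cons]
      simp only [List.isEmpty_cons, if_neg Bool.false_ne_true]
      rw [List.map_cons, List.filter_cons, hfs, List.map_cons, pvAbs_cons]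
      by_cases he : (pvBStepElem c (h :: t)).isEmpty = true
      · rw [if_neg (by simp [he]), if_pos he]
        exact ih'
      · rw [if_pos (by simp [he]), if_neg he]
        rw [ih']

theorem pvAbs_all_isEmpty (l : List (List String)) :
    (pvAbs l).isEmpty = l.all List.isEmpty := by
  induction l with
  | nil => rfl
  | cons s rest ih =>
    cases s with
    | nil => simpa [pvAbs, List.all_cons] using ih
    | cons h t => simp [pvAbs, List.all_cons]

theorem pvLoop_eq (fuel : Nat) (result : List String) (l : List (List String))
    (count : PySem.Dict String Int) (hinv : pvInv count l) :
    pvALoop fuel result (pvAbs l) = pvBLoop fuel result l count := by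
  induction fuel generalizing result l count with
  | zero =>
    simp only [pvALoop, pvBLoop, pvAbs_all_isEmpty]
  | succ n ih =>
    simp only [pvALoop, pvBLoop, pvAbs_all_isEmpty]
    by_cases he : l.all List.isEmpty
    · simp [he]
    · rw [if_neg (by simpa using he), if_neg (by simpa using he)]
      rw [pvFind_eq_cand count l hinv l]
      cases hcand : pvBCand count l with
      | none => rfl
      | some c =>
        dsimp only
        have hzero : pvTailCount c l = 0 := by
          have h0 := pvBCand_some_zero count l c hcand
          rw [hinv c] at h0
          exact_mod_cast h0
        have hnotail := (pvTailCount_zero_iff c l).mp hzero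
        rw [pvAbs_step c l hnotail, ← pvBStep_fst c l count]
        exact ih _ _ _ (pvInv_step c l count hinv)

theorem pvAbs_idem (sequences : List (List String)) :
    pvAbs (sequences.filter (fun s => !s.isEmpty)) = sequences.filter (fun s => !s.isEmpty) := by
  unfold pvAbs
  rw [List.filter_filter]
  simp

-- ===== VERDICT (by name: the statement is the Claim_ definition above) =====
theorem c3_merge_py_spec : Claim_equal_c3_merge_py := by
  intro sequences _
  unfold Spec_c3_merge_py c3_merge_py c3_merge_py_alt
  have h := pvLoop_eq 1000 [] (sequences.filter (fun s => !s.isEmpty))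
    (pvBCount (sequences.filter (fun s => !s.isEmpty)))
    (pvInv_init (sequences.filter (fun s => !s.isEmpty)))
  rw [pvAbs_idem] at h
  exact h
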